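-- pv_equiv track=rewrite | github.com/huwu666/the-hello-algo-of-python-code | test2/08.py | for_loop_recur
-- ===== SOURCE A (Python) =====
-- def for_loop_recur(n: int) -> int:
--     stack = []
--     res = 0
--     for i in range(n, 0, -1):
--         stack.append(i)
--
--     while stack:
--         res = stack.pop()
--     return res
-- ===== SOURCE B (Python) =====
-- def for_loop_recur(n: int) -> int:
--     return max(n, 0)
-- ===== Notes on version B (the rewrite author's own statement) =====
-- stated objective: simpler
-- what changed: Replaces the stack-building loop and pop-until-empty loop with the closed form max(n, 0): the last value popped is always the first element n of the descending range, and res stays 0 when the range is empty.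
import Mathlib
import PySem

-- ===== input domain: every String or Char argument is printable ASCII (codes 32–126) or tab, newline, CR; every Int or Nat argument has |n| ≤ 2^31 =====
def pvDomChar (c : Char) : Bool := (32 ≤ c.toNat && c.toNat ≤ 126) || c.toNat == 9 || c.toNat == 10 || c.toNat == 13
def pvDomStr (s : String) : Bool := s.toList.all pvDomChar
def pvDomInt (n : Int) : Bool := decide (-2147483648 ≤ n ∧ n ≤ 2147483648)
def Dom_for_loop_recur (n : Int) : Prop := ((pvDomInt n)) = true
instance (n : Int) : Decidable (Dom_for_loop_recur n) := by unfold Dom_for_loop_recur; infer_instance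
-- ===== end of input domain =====

-- B replaces A's build-a-stack-then-pop-everything loops with the closed form max(n, 0) (simpler).

-- ===== PORT A =====
-- 'while stack: res = stack.pop()' — pops the last element repeatedly until empty
def pvPopLoop : List Int → Int → Int
  | [], res => res
  | x :: xs, _ => pvPopLoop (x :: xs).dropLast ((x :: xs).getLastD 0)
termination_by xs _ => xs.length
decreasing_by simp [List.length_dropLast]

def for_loop_recur (n : Int) : Int :=
  -- stack = []; for i in range(n, 0, -1): stack.append(i)
  let stack := (PySem.List.pyRange n 0 (-1)).foldl (fun s i => s ++ [i]) []
  -- res = 0; while stack: res = stack.pop(); return res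
  pvPopLoop stack 0

-- ===== PORT B =====
def for_loop_recur_alt (n : Int) : Int := max n 0

-- ===== PRECONDITION & SPEC =====
def Spec_for_loop_recur (n : Int) (out : Int) : Prop := out = for_loop_recur_alt n
instance (n : Int) (out : Int) : Decidable (Spec_for_loop_recur n out) := by unfold Spec_for_loop_recur; infer_instance

-- ===== CLAIM (what is proved, stated in full; the proofs are below) =====
def Claim_equal_for_loop_recur : Prop := ∀ (n : Int), Dom_for_loop_recur n → Spec_for_loop_recur n (for_loop_recur n)

-- ===== LEMMAS AND PROOFS =====

-- popping everything leaves the first element (the last one popped), or res if empty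
theorem pvPopLoop_eq (xs : List Int) (res : Int) : pvPopLoop xs res = xs.headD res := by
  fun_induction pvPopLoop xs res with
  | case1 res => rfl
  | case2 x xs res ih =>
    rw [ih]
    cases xs with
    | nil => simp
    | cons y ys => simp [List.dropLast]

theorem foldl_append_singleton (xs : List Int) (acc : List Int) :
    xs.foldl (fun s i => s ++ [i]) acc = acc ++ xs := by
  induction xs generalizing acc with
  | nil => simp
  | cons x xs ih => simp [List.foldl, ih]

-- ===== VERDICT (by name: the statement is the Claim_ definition above) =====
theorem for_loop_recur_spec : Claim_equal_for_loop_recur := by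
  intro n _
  unfold Spec_for_loop_recur for_loop_recur for_loop_recur_alt
  rw [foldl_append_singleton, pvPopLoop_eq]
  by_cases h : 0 < n
  · rw [PySem.List.pyRange_neg_one_cons h]
    simp
    omega
  · rw [PySem.List.pyRange_neg_one_eq_nil (by omega)]
    simp
    omega
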